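-- pv_equiv track=rewrite | github.com/TJSNDHU/Aurem | backend/utils/aurem_jwt.py | check_tier_access
-- ===== SOURCE A (Python) =====
-- TIER_ROUTES = {
--     "starter": [
--         "/api/aurem/mission/create",
--         "/api/aurem/mission/{mission_id}",
--         "/api/aurem/missions/active",
--     ],
--     "professional": [
--         # All starter routes plus:
--         "/api/aurem/analytics",
--         "/api/aurem/webhook",
--     ],
--     "enterprise": [
--         # All routes - no restrictions
--         "*"
--     ]
-- }
--
-- def check_tier_access(tier: str, route: str) -> bool:
--     """Check if tier has access to route"""
--     if tier == "enterprise":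
--         return True  # Enterprise has access to everything
--
--     allowed_routes = TIER_ROUTES.get(tier, [])
--
--     # Check for exact match or wildcard pattern
--     for allowed in allowed_routes:
--         if allowed == "*":
--             return True
--         if allowed == route:
--             return True
--         # Check pattern with {param}
--         if "{" in allowed:
--             # Simple pattern matching
--             pattern_parts = allowed.split("/")
--             route_parts = route.split("/")
--             if len(pattern_parts) == len(route_parts):
--                 match = True
--                 for p, r in zip(pattern_parts, route_parts):
--                     if p.startswith("{") and p.endswith("}"):
--                         continue  # Parameter placeholder
--                     if p != r:
--                         match = False
--                         break
--                 if match: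
--                     return True
--
--     return False
-- ===== SOURCE B (Python) =====
-- TIER_ROUTES = {
--     "starter": [
--         "/api/aurem/mission/create",
--         "/api/aurem/mission/{mission_id}",
--         "/api/aurem/missions/active",
--     ],
--     "professional": [
--         "/api/aurem/analytics",
--         "/api/aurem/webhook",
--     ],
--     "enterprise": [
--         "*"
--     ]
-- }
--
--
-- def check_tier_access(tier: str, route: str) -> bool:
--     """Check if tier has access to route.
--
--     The route table is a module constant, so instead of interpreting the
--     pattern list at every call we hard-compile it into a direct decision
--     procedure: no loop, no split, no pattern scan.  The single '{param}'
--     pattern '/api/aurem/mission/{mission_id}' is exactly 'starts with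
--     "/api/aurem/mission/" and the remainder is one segment (contains no
--     "/")' -- a placeholder may match an empty segment, hence no
--     non-emptiness test on the remainder.
--     """
--     if tier == "enterprise":
--         return True
--     if tier == "professional":
--         return route in ("/api/aurem/analytics", "/api/aurem/webhook")
--     if tier == "starter":
--         if route in ("/api/aurem/mission/create", "/api/aurem/missions/active"):
--             return True
--         prefix = "/api/aurem/mission/"
--         return route.startswith(prefix) and "/" not in route[len(prefix):]
--     return False
-- ===== Notes on version B (the rewrite author's own statement) =====
-- stated objective: simpler
-- what changed: A interprets the constant pattern table at every call (dict lookup, loop over patterns, split both strings on '/' and scan segments with a match flag); B compiles the fixed table away into a direct per-tier decision procedure -- constant string comparisons plus one startswith and a no-'/' test on the remainder for the single '{param}' pattern -- with no dict, no loop and no splitting.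
import Mathlib
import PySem

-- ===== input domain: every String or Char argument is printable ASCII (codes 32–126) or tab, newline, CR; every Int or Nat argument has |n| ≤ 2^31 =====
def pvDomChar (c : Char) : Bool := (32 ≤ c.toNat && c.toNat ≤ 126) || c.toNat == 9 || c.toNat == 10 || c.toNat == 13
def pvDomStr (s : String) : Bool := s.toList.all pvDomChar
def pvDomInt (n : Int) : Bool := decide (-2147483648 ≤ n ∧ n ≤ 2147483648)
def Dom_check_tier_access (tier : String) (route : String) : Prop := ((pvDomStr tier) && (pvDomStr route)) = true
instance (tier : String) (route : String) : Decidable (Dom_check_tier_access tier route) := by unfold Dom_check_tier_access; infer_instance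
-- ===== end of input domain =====

-- A interprets the constant pattern table at every call (dict lookup, loop over
-- patterns, split both strings and scan segments); B compiles the fixed table away
-- into a direct per-tier decision procedure with no dict, no loop and no splitting;
-- objective: simpler.

-- ===== PORT A =====
def TIER_ROUTES : PySem.Dict String (List String) :=
  PySem.Dict.ofList [
    ("starter", ["/api/aurem/mission/create", "/api/aurem/mission/{mission_id}",
                 "/api/aurem/missions/active"]),
    ("professional", ["/api/aurem/analytics", "/api/aurem/webhook"]),
    ("enterprise", ["*"])]

-- inner 'for p, r in zip(...)' loop with the match flag and break
def checkSegsA : List (List Char × List Char) → Bool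
  | [] => true
  | (p, r) :: rest =>
    if PySem.Chars.startswith p ['{'] && PySem.Chars.endswith p ['}'] then checkSegsA rest
    else if p == r then checkSegsA rest
    else false

-- outer 'for allowed in allowed_routes' loop with its early returns
def loopA : List String → String → Bool
  | [], _ => false
  | allowed :: rest, route =>
    if allowed == "*" then true
    else if allowed == route then true
    else if PySem.Str.isIn "{" allowed then
      let pattern_parts := PySem.Chars.splitOn allowed.toList ['/']
      let route_parts := PySem.Chars.splitOn route.toList ['/']
      if pattern_parts.length == route_parts.length then
        if checkSegsA (pattern_parts.zip route_parts) then true else loopA rest route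
      else loopA rest route
    else loopA rest route

def check_tier_access (tier : String) (route : String) : Bool :=
  if tier == "enterprise" then true
  else loopA ((TIER_ROUTES.get? tier).getD []) route

-- ===== PORT B =====
-- B hard-compiles the constant route table: direct string tests per tier; the only
-- '{param}' pattern becomes "starts with '/api/aurem/mission/' and the remainder
-- contains no '/'" (a placeholder may match an empty segment).
def check_tier_access_alt (tier : String) (route : String) : Bool :=
  if tier == "enterprise" then true
  else if tier == "professional" then
    route == "/api/aurem/analytics" || route == "/api/aurem/webhook"
  else if tier == "starter" then
    if route == "/api/aurem/mission/create" || route == "/api/aurem/missions/active" then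
      true
    else
      -- route.startswith(prefix) and "/" not in route[len(prefix):]
      PySem.Chars.startswith route.toList "/api/aurem/mission/".toList &&
        !(PySem.Chars.isIn "/".toList
            (PySem.List.slice route.toList (some (PySem.Str.len "/api/aurem/mission/")) none))
  else false

-- ===== PRECONDITION & SPEC =====
def Spec_check_tier_access (tier : String) (route : String) (out : Bool) : Prop := out = check_tier_access_alt tier route
instance (tier : String) (route : String) (out : Bool) : Decidable (Spec_check_tier_access tier route out) := by unfold Spec_check_tier_access; infer_instance

-- ===== CLAIM (what is proved, stated in full; the proofs are below) =====
def Claim_equal_check_tier_access : Prop := ∀ (tier : String) (route : String), Dom_check_tier_access tier route → Spec_check_tier_access tier route (check_tier_access tier route)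

-- ===== LEMMAS AND PROOFS =====

-- reference model of s.split("/") used only in the proofs
def pvSplit (pre : List Char) : List Char → List (List Char)
  | [] => [pre]
  | c :: rest => if c = '/' then pre :: pvSplit [] rest else pvSplit (pre ++ [c]) rest

def pvJoin : List (List Char) → List Char
  | [] => []
  | [x] => x
  | x :: y :: ys => x ++ '/' :: pvJoin (y :: ys)

theorem go_eq_pvSplit (fuel : Nat) (l cur : List Char) (acc : List (List Char))
    (h : l.length ≤ fuel) :
    PySem.Chars.splitOn.go ['/'] fuel l cur acc
      = acc.reverse ++ pvSplit cur.reverse l := by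
  induction fuel generalizing l cur acc with
  | zero =>
    have : l = [] := List.length_eq_zero_iff.mp (Nat.le_zero.mp h)
    subst this
    simp [PySem.Chars.splitOn.go, pvSplit]
  | succ n ih =>
    cases l with
    | nil => simp [PySem.Chars.splitOn.go, pvSplit]
    | cons c rest =>
      by_cases hc : c = '/'
      · subst hc
        have hp : List.isPrefixOf ['/'] ('/' :: rest) = true := by
          simp [List.isPrefixOf]
        have hd : List.drop ['/'].length ('/' :: rest) = rest := by simp
        rw [PySem.Chars.splitOn.go]
        simp only [hp, if_pos trivial, hd]
        rw [ih rest [] (cur.reverse :: acc) (by simpa using Nat.le_of_succ_le_succ h)]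
        simp [pvSplit]
      · have hp : List.isPrefixOf ['/'] (c :: rest) = false := by
          simp [List.isPrefixOf]
          exact fun h' => absurd h'.symm hc
        rw [PySem.Chars.splitOn.go]
        simp only [hp, Bool.false_eq_true, if_false]
        rw [ih rest (c :: cur) acc (by simpa using Nat.le_of_succ_le_succ h)]
        simp [pvSplit, hc]

theorem splitOn_eq_pvSplit (s : List Char) :
    PySem.Chars.splitOn s ['/'] = pvSplit [] s := by
  unfold PySem.Chars.splitOn
  rw [go_eq_pvSplit _ _ _ _ (by omega)]
  simp

theorem pvSplit_ne_nil (pre : List Char) (l : List Char) : pvSplit pre l ≠ [] := by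
  induction l generalizing pre with
  | nil => simp [pvSplit]
  | cons c rest ih =>
    by_cases h : c = '/'
    · simp [pvSplit, h]
    · simpa [pvSplit, h] using ih _

theorem pvJoin_pvSplit (l pre : List Char) : pvJoin (pvSplit pre l) = pre ++ l := by
  induction l generalizing pre with
  | nil => simp [pvSplit, pvJoin]
  | cons c rest ih =>
    by_cases h : c = '/'
    · subst h
      have hne := pvSplit_ne_nil ([] : List Char) rest
      cases hs : pvSplit ([] : List Char) rest with
      | nil => exact absurd hs hne
      | cons y ys =>
        have := ih ([] : List Char)
        rw [hs] at this
        simp [pvSplit, pvJoin, hs]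
        simpa using this
    · simp [pvSplit, h, ih]

theorem pvSplit_no_slash {l : List Char} (pre : List Char) (h : '/' ∉ l) :
    pvSplit pre l = [pre ++ l] := by
  induction l generalizing pre with
  | nil => simp [pvSplit]
  | cons c rest ih =>
    have hc : c ≠ '/' := fun hh => h (by simp [hh])
    have ht : '/' ∉ rest := fun hm => h (by simp [hm])
    simp [pvSplit, hc, ih (pre ++ [c]) ht]

theorem pvSplit_prefix {t : List Char} (h : '/' ∉ t) :
    pvSplit [] ("/api/aurem/mission/".toList ++ t) =
      [[], "api".toList, "aurem".toList, "mission".toList, t] := by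
  simp [show "/api/aurem/mission/".toList = ['/','a','p','i','/','a','u','r','e','m','/','m','i','s','s','i','o','n','/'] from rfl,
    pvSplit, pvSplit_no_slash _ h]

theorem pvSplit_seg_no_slash {l pre seg : List Char} (hs : seg ∈ pvSplit pre l)
    (hp : '/' ∉ pre) : '/' ∉ seg := by
  induction l generalizing pre with
  | nil => simp [pvSplit] at hs; subst hs; exact hp
  | cons c rest ih =>
    by_cases hc : c = '/'
    · subst hc
      simp [pvSplit] at hs
      rcases hs with hs | hs
      · subst hs; exact hp
      · exact ih hs (by simp)
    · simp [pvSplit, hc] at hs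
      exact ih hs (by simp [hp, Ne.symm hc])

theorem splitPat_lit :
    PySem.Chars.splitOn "/api/aurem/mission/{mission_id}".toList ['/'] =
      [[], "api".toList, "aurem".toList, "mission".toList, "{mission_id}".toList] := by
  decide

theorem checkSegs_lit (a b c d e : List Char) :
    checkSegsA ([[], "api".toList, "aurem".toList, "mission".toList,
        "{mission_id}".toList].zip [a, b, c, d, e]) = true ↔
      ([] = a ∧ "api".toList = b ∧ "aurem".toList = c ∧ "mission".toList = d) := by
  have s0 : (PySem.Chars.startswith ([] : List Char) ['{'] &&
      PySem.Chars.endswith ([] : List Char) ['}']) = false := by decide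
  have s1 : (PySem.Chars.startswith "api".toList ['{'] &&
      PySem.Chars.endswith "api".toList ['}']) = false := by decide
  have s2 : (PySem.Chars.startswith "aurem".toList ['{'] &&
      PySem.Chars.endswith "aurem".toList ['}']) = false := by decide
  have s3 : (PySem.Chars.startswith "mission".toList ['{'] &&
      PySem.Chars.endswith "mission".toList ['}']) = false := by decide
  have s4 : (PySem.Chars.startswith "{mission_id}".toList ['{'] &&
      PySem.Chars.endswith "{mission_id}".toList ['}']) = true := by decide
  simp only [List.zip, List.zipWith, checkSegsA, s0, s1, s2, s3, s4,
    Bool.false_eq_true, if_false, if_true, beq_iff_eq]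
  split_ifs with h1 h2 h3 h4 <;> simp_all

theorem infix_single_iff_mem (e : List Char) : ['/'] <:+: e ↔ '/' ∈ e := by
  constructor
  · rintro ⟨s1, s2, rfl⟩; simp
  · intro hm
    rcases List.append_of_mem hm with ⟨s1, s2, rfl⟩
    exact ⟨s1, s2, by simp⟩

theorem drop19_append (e : List Char) :
    ("/api/aurem/mission/".toList ++ e).drop 19 = e := by
  rw [show (19 : Nat) = "/api/aurem/mission/".toList.length from rfl]
  exact List.drop_left

theorem pat_eq_swns (route : String) :
    (((PySem.Chars.splitOn "/api/aurem/mission/{mission_id}".toList ['/']).length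
        == (PySem.Chars.splitOn route.toList ['/']).length) &&
      checkSegsA ((PySem.Chars.splitOn "/api/aurem/mission/{mission_id}".toList ['/']).zip
        (PySem.Chars.splitOn route.toList ['/'])))
    = (PySem.Chars.startswith route.toList "/api/aurem/mission/".toList &&
       !(PySem.Chars.isIn "/".toList
          (PySem.List.slice route.toList (some (PySem.Str.len "/api/aurem/mission/")) none))) := by
  have hlen19 : PySem.Str.len "/api/aurem/mission/" = ((19 : Nat) : Int) := by decide
  have hslice : PySem.List.slice route.toList (some (PySem.Str.len "/api/aurem/mission/")) none
      = route.toList.drop 19 := by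
    rw [hlen19]; exact PySem.List.slice_from_natCast _ _
  rw [Bool.eq_iff_iff]
  simp only [Bool.and_eq_true, beq_iff_eq, Bool.not_eq_true', hslice, splitPat_lit]
  constructor
  · rintro ⟨hlen, hcs⟩
    rcases hrp : PySem.Chars.splitOn route.toList ['/'] with _ | ⟨a, _ | ⟨b, _ | ⟨c, _ | ⟨d, _ | ⟨e, rest⟩⟩⟩⟩⟩ <;>
      rw [hrp] at hlen <;> simp at hlen
    have hrest : rest = [] := List.length_eq_zero_iff.mp (by simpa using hlen.symm)
    subst hrest
    rw [hrp] at hcs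
    obtain ⟨ha, hb, hc, hd⟩ := (checkSegs_lit a b c d e).mp hcs
    subst ha; subst hb; subst hc; subst hd
    rw [splitOn_eq_pvSplit] at hrp
    have hroute : route.toList = "/api/aurem/mission/".toList ++ e := by
      have := pvJoin_pvSplit route.toList []
      rw [hrp] at this
      simpa [pvJoin] using this.symm
    have hns : '/' ∉ e :=
      pvSplit_seg_no_slash (l := route.toList) (pre := []) (by rw [hrp]; simp) (by simp)
    refine ⟨(PySem.Chars.startswith_iff _ _).mpr ⟨e, hroute.symm⟩, ?_⟩
    rw [hroute, drop19_append]
    exact (PySem.Chars.isIn_eq_false_iff _ _).mpr (by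
      intro hinf
      exact hns ((infix_single_iff_mem e).mp (by simpa using hinf)))
  · rintro ⟨hsw, hni⟩
    obtain ⟨t, ht⟩ := (PySem.Chars.startswith_iff _ _).mp hsw
    have hns : '/' ∉ t := by
      rw [← ht, drop19_append] at hni
      intro hm
      exact absurd ((PySem.Chars.isIn_eq_false_iff _ _).mp hni)
        (by simpa using not_not.mpr ((infix_single_iff_mem t).mpr hm))
    have hsp : PySem.Chars.splitOn route.toList ['/'] =
        [[], "api".toList, "aurem".toList, "mission".toList, t] := by
      rw [splitOn_eq_pvSplit, ← ht, pvSplit_prefix hns]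
    rw [hsp]
    exact ⟨by simp, (checkSegs_lit _ _ _ _ _).mpr ⟨rfl, rfl, rfl, rfl⟩⟩

theorem loopA_starter (route : String) :
    loopA ["/api/aurem/mission/create", "/api/aurem/mission/{mission_id}",
           "/api/aurem/missions/active"] route
    = (route == "/api/aurem/mission/create" || route == "/api/aurem/missions/active" ||
       (PySem.Chars.startswith route.toList "/api/aurem/mission/".toList &&
        !(PySem.Chars.isIn "/".toList
           (PySem.List.slice route.toList (some (PySem.Str.len "/api/aurem/mission/")) none)))) := by
  by_cases hr1 : route = "/api/aurem/mission/create"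
  · subst hr1; decide
  by_cases hr2 : route = "/api/aurem/mission/{mission_id}"
  · subst hr2; decide
  by_cases hr3 : route = "/api/aurem/missions/active"
  · subst hr3; decide
  have e1 : ("/api/aurem/mission/create" == route) = false :=
    beq_eq_false_iff_ne.mpr (Ne.symm hr1)
  have e2 : ("/api/aurem/mission/{mission_id}" == route) = false :=
    beq_eq_false_iff_ne.mpr (Ne.symm hr2)
  have e3 : ("/api/aurem/missions/active" == route) = false :=
    beq_eq_false_iff_ne.mpr (Ne.symm hr3)
  have e1' : (route == "/api/aurem/mission/create") = false :=
    beq_eq_false_iff_ne.mpr hr1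
  have e3' : (route == "/api/aurem/missions/active") = false :=
    beq_eq_false_iff_ne.mpr hr3
  have f1 : PySem.Str.isIn "{" "/api/aurem/mission/create" = false := by decide
  have f2 : PySem.Str.isIn "{" "/api/aurem/mission/{mission_id}" = true := by decide
  have f3 : PySem.Str.isIn "{" "/api/aurem/missions/active" = false := by decide
  have g1 : ("/api/aurem/mission/create" == "*") = false := by decide
  have g2 : ("/api/aurem/mission/{mission_id}" == "*") = false := by decide
  have g3 : ("/api/aurem/missions/active" == "*") = false := by decide
  have hp := pat_eq_swns route
  rw [← hp]
  simp only [loopA, e1, e2, e3, e1', e3', f1, f2, f3, g1, g2, g3,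
    Bool.false_eq_true, if_false, Bool.false_or]
  cases hl : ((PySem.Chars.splitOn "/api/aurem/mission/{mission_id}".toList ['/']).length
      == (PySem.Chars.splitOn route.toList ['/']).length) <;>
    cases hc : checkSegsA ((PySem.Chars.splitOn "/api/aurem/mission/{mission_id}".toList ['/']).zip
      (PySem.Chars.splitOn route.toList ['/'])) <;>
    simp

theorem loopA_pro (route : String) :
    loopA ["/api/aurem/analytics", "/api/aurem/webhook"] route
    = (route == "/api/aurem/analytics" || route == "/api/aurem/webhook") := by
  have g1 : ("/api/aurem/analytics" == "*") = false := by decide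
  have g2 : ("/api/aurem/webhook" == "*") = false := by decide
  have f1 : PySem.Str.isIn "{" "/api/aurem/analytics" = false := by decide
  have f2 : PySem.Str.isIn "{" "/api/aurem/webhook" = false := by decide
  rw [show (route == "/api/aurem/analytics") = ("/api/aurem/analytics" == route) from
        Bool.beq_comm ..,
      show (route == "/api/aurem/webhook") = ("/api/aurem/webhook" == route) from
        Bool.beq_comm ..]
  simp only [loopA, g1, g2, f1, f2, Bool.false_eq_true, if_false]
  cases h1 : ("/api/aurem/analytics" == route) <;>
    cases h2 : ("/api/aurem/webhook" == route) <;> simp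

theorem TIER_get_none (t : String) (h1 : (t == "starter") = false)
    (h2 : (t == "professional") = false) (h3 : (t == "enterprise") = false) :
    TIER_ROUTES.get? t = none := by
  simp [TIER_ROUTES, PySem.Dict.ofList, PySem.Dict.get?, PySem.Dict.update,
    PySem.Dict.empty, PySem.Dict.insert]
  refine ⟨fun h => ?_, fun h => ?_, fun h => ?_⟩ <;> simp [← h] at h1 h2 h3

-- ===== VERDICT (by name: the statement is the Claim_ definition above) =====
theorem check_tier_access_spec : Claim_equal_check_tier_access := by
  intro tier route _
  unfold Spec_check_tier_access check_tier_access check_tier_access_alt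
  by_cases he : (tier == "enterprise") = true
  · simp [he]
  have he' : (tier == "enterprise") = false := by simpa using he
  by_cases hs : (tier == "starter") = true
  · have : tier = "starter" := by simpa using hs
    subst this
    rw [show TIER_ROUTES.get? "starter" = some ["/api/aurem/mission/create",
      "/api/aurem/mission/{mission_id}", "/api/aurem/missions/active"] from by decide]
    simp only [Option.getD_some, loopA_starter]
    cases h1 : (route == "/api/aurem/mission/create") <;>
      cases h2 : (route == "/api/aurem/missions/active") <;> simp
  by_cases hpr : (tier == "professional") = true
  · have : tier = "professional" := by simpa using hpr
    subst this
    rw [show TIER_ROUTES.get? "professional" = some ["/api/aurem/analytics",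
      "/api/aurem/webhook"] from by decide]
    simp [loopA_pro]
  have hs' : (tier == "starter") = false := by simpa using hs
  have hpr' : (tier == "professional") = false := by simpa using hpr
  rw [TIER_get_none tier hs' hpr' he']
  simp [he', hs', hpr', loopA]
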